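-- pv_equiv track=rewrite | github.com/FJordanov/Elsys-schoolwork- | 102/hw 1.py | longword
-- ===== SOURCE A (Python) =====
-- def longword(input_string):
--     lengths = []
--     word_length = 0
--     words = []
--
--     for i in range(len(input_string)):
--         if input_string[i] != ' ' and input_string[i] != '.':
--             word_length += 1
--         else:
--             if word_length > 0:
--                 words.append(input_string[i - word_length:i])
--                 lengths.append(word_length)
--                 word_length = 0
--
--     if word_length > 0:
--         words.append(input_string[-word_length:])
--         lengths.append(word_length)
--
--     return lengths, words
-- ===== SOURCE B (Python) =====
-- def longword(input_string):
--     words = [w for w in input_string.replace('.', ' ').split(' ') if w]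
--     lengths = [len(w) for w in words]
--     return lengths, words
-- ===== Notes on version B (the rewrite author's own statement) =====
-- stated objective: idiomatic
-- what changed: Replaced the incremental index-arithmetic character scan with a two-phase split-then-map decomposition: normalize periods to spaces, split on spaces, drop empty tokens, then map len over the words.
import Mathlib
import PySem

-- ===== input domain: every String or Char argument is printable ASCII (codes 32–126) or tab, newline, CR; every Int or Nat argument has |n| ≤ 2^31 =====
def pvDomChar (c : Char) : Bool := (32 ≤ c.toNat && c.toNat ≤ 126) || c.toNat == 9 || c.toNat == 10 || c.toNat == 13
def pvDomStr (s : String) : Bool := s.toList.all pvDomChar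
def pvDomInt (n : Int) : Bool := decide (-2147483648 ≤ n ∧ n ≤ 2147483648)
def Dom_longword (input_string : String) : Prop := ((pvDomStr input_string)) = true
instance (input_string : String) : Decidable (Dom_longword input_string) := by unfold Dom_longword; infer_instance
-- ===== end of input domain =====

-- B replaces A's incremental index-arithmetic character scan by a two-phase split-then-map
-- decomposition (objective: idiomatic); return values proved equal on all of Dom.


-- ===== PORT A =====
-- the body of A's for-loop over i in range(len(input_string)), on state (lengths, word_length, words)

def longwordStep (cs : List Char) (st : List Int × Int × List String) (i : Int) :
    List Int × Int × List String :=
  let (lengths, word_length, words) := st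
  let c := PySem.List.pyGetD cs i ' '
  if c ≠ ' ' ∧ c ≠ '.' then
    (lengths, word_length + 1, words)
  else
    if word_length > 0 then
      (lengths ++ [word_length], 0,
       words ++ [String.ofList (PySem.List.slice cs (some (i - word_length)) (some i))])
    else
      (lengths, word_length, words)

def longword (input_string : String) : List Int × List String :=
  let cs := input_string.toList
  let st := (PySem.List.pyRange 0 (PySem.Str.len input_string) 1).foldl (longwordStep cs) ([], 0, [])
  let (lengths, word_length, words) := st
  if word_length > 0 then
    (lengths ++ [word_length],
     words ++ [String.ofList (PySem.List.slice cs (some (-word_length)) none)])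
  else
    (lengths, words)

-- ===== PORT B =====
def longword_alt (input_string : String) : List Int × List String :=
  let cs := input_string.toList
  let words := (PySem.Chars.splitOn (PySem.Chars.replace cs ['.'] [' ']) [' ']).filter
    (fun w => w ≠ [])
  (words.map (fun w => PySem.Chars.len w), words.map String.ofList)

-- ===== PRECONDITION & SPEC =====
def Spec_longword (input_string : String) (out : List Int × List String) : Prop := out = longword_alt input_string
instance (input_string : String) (out : List Int × List String) : Decidable (Spec_longword input_string out) := by unfold Spec_longword; infer_instance

-- ===== CLAIM (what is proved, stated in full; the proofs are below) =====
def Claim_equal_longword : Prop := ∀ (input_string : String), Dom_longword input_string → Spec_longword input_string (longword input_string)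

-- ===== LEMMAS AND PROOFS =====

-- the delimiter-normalizing map '.' ↦ ' '
def pvF (c : Char) : Char := if c = '.' then ' ' else c

-- single-character split with an open current-piece accumulator (characterizes Chars.splitOn.go)
def pvSplitD (d : Char) (cur : List Char) : List Char → List (List Char)
  | [] => [cur]
  | c :: rest => if c = d then cur :: pvSplitD d [] rest else pvSplitD d (cur ++ [c]) rest

-- the common word scan both ports are reduced to: (finished words, current run)
def pvStepW (p : List (List Char) × List Char) (c : Char) : List (List Char) × List Char :=
  if c = ' ' ∨ c = '.' then
    (if p.2 = [] then (p.1, []) else (p.1 ++ [p.2], []))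
  else
    (p.1, p.2 ++ [c])

theorem pvReplace_go_single : ∀ (l : List Char) (fuel : Nat) (acc : List Char),
    l.length ≤ fuel →
    PySem.Chars.replace.go ['.'] [' '] fuel l acc = acc.reverse ++ l.map pvF := by
  intro l
  induction l with
  | nil => intro fuel acc _; cases fuel <;> simp [PySem.Chars.replace.go]
  | cons c t ih =>
    intro fuel acc h
    cases fuel with
    | zero => simp at h
    | succ f =>
      simp only [List.length_cons, Nat.add_le_add_iff_right] at h
      by_cases hc : c = '.'
      · subst hc
        simp only [PySem.Chars.replace.go, List.isPrefixOf, beq_self_eq_true, Bool.true_and,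
          if_pos, List.length_cons, List.length_nil, List.drop_succ_cons, List.drop_zero]
        rw [ih f _ h]
        simp [pvF]
      · have hpref : (List.isPrefixOf ['.'] (c :: t)) = false := by
          simp [List.isPrefixOf]
          exact fun h' => hc h'.symm
        simp only [PySem.Chars.replace.go, hpref, Bool.false_eq_true, if_false]
        rw [ih f _ h]
        simp [pvF, hc]

theorem pvReplace_single (cs : List Char) :
    PySem.Chars.replace cs ['.'] [' '] = cs.map pvF := by
  rw [PySem.Chars.replace, if_neg (by simp)]
  simpa using pvReplace_go_single cs cs.length [] (le_refl _)

theorem pvSplitOn_go_single (d : Char) : ∀ (l : List Char) (fuel : Nat) (cur : List Char)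
    (acc : List (List Char)), l.length ≤ fuel →
    PySem.Chars.splitOn.go [d] fuel l cur acc = acc.reverse ++ pvSplitD d cur.reverse l := by
  intro l
  induction l with
  | nil => intro fuel cur acc _; cases fuel <;> simp [PySem.Chars.splitOn.go, pvSplitD]
  | cons c t ih =>
    intro fuel cur acc h
    cases fuel with
    | zero => simp at h
    | succ f =>
      simp only [List.length_cons, Nat.add_le_add_iff_right] at h
      by_cases hc : c = d
      · subst hc
        simp only [PySem.Chars.splitOn.go, List.isPrefixOf, beq_self_eq_true, Bool.true_and,
          List.isPrefixOf_nil_left, if_pos, List.length_cons, List.length_nil,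
          List.drop_succ_cons, List.drop_zero]
        rw [ih f _ _ h]
        simp [pvSplitD]
      · have hpref : (List.isPrefixOf [d] (c :: t)) = false := by
          simp [List.isPrefixOf]
          exact fun h' => hc h'.symm
        simp only [PySem.Chars.splitOn.go, hpref, Bool.false_eq_true, if_false]
        rw [ih f _ _ h]
        simp [pvSplitD, hc]

theorem pvSplitOn_single (d : Char) (l : List Char) :
    PySem.Chars.splitOn l [d] = pvSplitD d [] l := by
  rw [PySem.Chars.splitOn]
  simpa using pvSplitOn_go_single d l (l.length + 1) [] [] (by omega)

theorem pvFoldl_stepW_ws : ∀ (l : List Char) (ws : List (List Char)) (cur : List Char),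
    l.foldl pvStepW (ws, cur) =
      (ws ++ (l.foldl pvStepW ([], cur)).1, (l.foldl pvStepW ([], cur)).2) := by
  intro l
  induction l with
  | nil => simp
  | cons c t ih =>
    intro ws cur
    simp only [List.foldl_cons]
    by_cases hc : c = ' ' ∨ c = '.'
    · by_cases hcur : cur = []
      · simp only [pvStepW, if_pos hc, hcur, if_pos rfl]
        exact ih ws []
      · simp only [pvStepW, if_pos hc, if_neg hcur, List.nil_append]
        rw [ih (ws ++ [cur]) [], ih [cur] []]
        simp
    · simp only [pvStepW, if_neg hc]
      exact ih ws (cur ++ [c])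

theorem pvFilter_splitD : ∀ (l : List Char) (cur : List Char),
    (pvSplitD ' ' cur (l.map pvF)).filter (fun w => w ≠ []) =
      (l.foldl pvStepW ([], cur)).1 ++
        (if (l.foldl pvStepW ([], cur)).2 = [] then [] else [(l.foldl pvStepW ([], cur)).2]) := by
  intro l
  induction l with
  | nil =>
    intro cur
    by_cases hcur : cur = [] <;> simp [pvSplitD, hcur]
  | cons c t ih =>
    intro cur
    by_cases hc : c = ' ' ∨ c = '.'
    · have hfc : pvF c = ' ' := by
        rcases hc with h | h <;> simp [pvF, h]
      simp only [List.map_cons, hfc, pvSplitD, if_pos rfl, if_true, List.foldl_cons, pvStepW,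
        if_pos hc]
      by_cases hcur : cur = []
      · simp only [hcur, if_pos rfl, List.filter_cons]
        simpa using ih []
      · simp only [if_neg hcur, List.filter_cons, List.nil_append]
        rw [pvFoldl_stepW_ws t [cur] [], ih []]
        simp [hcur]
    · simp only [not_or] at hc
      have hfc : pvF c = c := by simp [pvF, hc.2]
      rw [List.map_cons, hfc]
      simp only [pvSplitD, if_neg hc.1, List.foldl_cons, pvStepW,
        if_neg (not_or.mpr hc)]
      exact ih (cur ++ [c])

theorem pvInv (cs : List Char) : ∀ (k : Nat), k ≤ cs.length →
    (PySem.List.pyRange 0 (k : Int) 1).foldl (longwordStep cs) ([], 0, []) =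
      (((cs.take k).foldl pvStepW ([], [])).1.map (fun w => (w.length : Int)),
       ((((cs.take k).foldl pvStepW ([], [])).2.length : Int)),
       ((cs.take k).foldl pvStepW ([], [])).1.map String.ofList)
    ∧ ((cs.take k).foldl pvStepW ([], [])).2.length ≤ k
    ∧ (cs.drop (k - ((cs.take k).foldl pvStepW ([], [])).2.length)).take
        ((cs.take k).foldl pvStepW ([], [])).2.length = ((cs.take k).foldl pvStepW ([], [])).2 := by
  intro k
  induction k with
  | zero => intro _; simp [PySem.List.pyRange_one_eq_nil]
  | succ k ih =>
    intro hk1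
    have hk : k < cs.length := by omega
    obtain ⟨h1, h2, h3⟩ := ih (by omega)
    have hrange : PySem.List.pyRange 0 ((k + 1 : Nat) : Int) 1
        = PySem.List.pyRange 0 (k : Nat) 1 ++ [(k : Int)] := by
      push_cast
      exact PySem.List.pyRange_one_succ_right (a := 0) (b := (k : Int)) (by omega)
    have htake : cs.take (k + 1) = cs.take k ++ [cs[k]] := by
      rw [List.take_add_one, List.getElem?_eq_getElem hk]
      rfl
    set p := (cs.take k).foldl pvStepW ([], []) with hp
    have hget : PySem.List.pyGetD cs ((k : Nat) : Int) ' ' = cs[k] := by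
      simp [PySem.List.pyGetD_natCast, List.getD_eq_getElem?_getD, List.getElem?_eq_getElem hk]
    rw [hrange, List.foldl_append, List.foldl_cons, List.foldl_nil, h1, htake,
      List.foldl_append, List.foldl_cons, List.foldl_nil]
    by_cases hc : cs[k] = ' ' ∨ cs[k] = '.'
    · by_cases hcur : p.2 = []
      · have hstepB : pvStepW p cs[k] = (p.1, []) := by
          simp [pvStepW, hc, hcur]
        have hwl : ¬((p.2.length : Int) > 0) := by simp [hcur]
        have hstepA : longwordStep cs (p.1.map (fun w => (w.length : Int)), ((p.2.length : Int)),
            p.1.map String.ofList) ((k : Nat) : Int)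
            = (p.1.map (fun w => (w.length : Int)), ((p.2.length : Int)), p.1.map String.ofList) := by
          simp only [longwordStep, hget]
          rw [if_neg (by tauto), if_neg hwl]
        rw [hstepA, hstepB]
        exact ⟨by simp [hcur], by simp, by simp⟩
      · have hstepB : pvStepW p cs[k] = (p.1 ++ [p.2], []) := by
          simp [pvStepW, hc, hcur]
        have hword : PySem.List.slice cs (some (((k : Nat) : Int) - (p.2.length : Int)))
            (some ((k : Nat) : Int)) = p.2 := by
          have hle : p.2.length ≤ k := h2
          have hcast : ((k : Nat) : Int) - (p.2.length : Int) = ((k - p.2.length : Nat) : Int) := by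
            push_cast [hle]; ring
          rw [hcast, PySem.List.slice_natCast]
          have hsub : k - (k - p.2.length) = p.2.length := by omega
          rw [hsub]
          exact h3
        have hwl : ((p.2.length : Int) > 0) := by
          simp [List.length_pos_iff, hcur]
        have hstepA : longwordStep cs (p.1.map (fun w => (w.length : Int)), ((p.2.length : Int)),
            p.1.map String.ofList) ((k : Nat) : Int)
            = (p.1.map (fun w => (w.length : Int)) ++ [(p.2.length : Int)], 0,
               p.1.map String.ofList ++ [String.ofList p.2]) := by
          simp only [longwordStep, hget]
          rw [if_neg (by tauto), if_pos hwl, hword]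
        rw [hstepA, hstepB]
        exact ⟨by simp, by simp, by simp⟩
    · rw [not_or] at hc
      have hstepB : pvStepW p cs[k] = (p.1, p.2 ++ [cs[k]]) := by
        simp [pvStepW, hc.1, hc.2]
      have hstepA : longwordStep cs (p.1.map (fun w => (w.length : Int)), ((p.2.length : Int)),
          p.1.map String.ofList) ((k : Nat) : Int)
          = (p.1.map (fun w => (w.length : Int)), ((p.2.length : Int)) + 1,
             p.1.map String.ofList) := by
        simp only [longwordStep, hget]
        rw [if_pos hc]
      rw [hstepA, hstepB]
      refine ⟨by simp, by simp; omega, ?_⟩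
      have hlen : p.2.length ≤ k := h2
      have h4 : k + 1 - (p.2 ++ [cs[k]]).length = k - p.2.length := by simp
      rw [h4]
      simp only [List.length_append, List.length_singleton]
      rw [List.take_add_one, h3]
      have hidx : k - p.2.length + p.2.length = k := by omega
      have hgg : (cs.drop (k - p.2.length))[p.2.length]? = some cs[k] := by
        rw [List.getElem?_drop, hidx]
        exact List.getElem?_eq_getElem hk
      rw [hgg]
      rfl

theorem longword_eq_alt (s : String) : longword s = longword_alt s := by
  unfold longword longword_alt
  have hlen : PySem.Str.len s = ((s.toList.length : Nat) : Int) := by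
    simp [PySem.Str.len, PySem.Chars.len]
  rw [hlen]
  dsimp only
  obtain ⟨h1, h2, h3⟩ := pvInv s.toList s.toList.length (le_refl _)
  rw [List.take_length] at h1 h2 h3
  rw [h1, pvReplace_single, pvSplitOn_single, pvFilter_splitD s.toList []]
  set p := (s.toList).foldl pvStepW ([], []) with hp
  by_cases hcur : p.2 = []
  · rw [if_neg (by simp [hcur]), if_pos hcur]
    simp [PySem.Chars.len]
  · have hpos : (0:Int) < (p.2.length : Int) := by
      simp [List.length_pos_iff, hcur]
    rw [if_pos hpos, if_neg hcur]
    have hdrop : s.toList.drop (s.toList.length - p.2.length) = p.2 := by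
      have hl : (s.toList.drop (s.toList.length - p.2.length)).length = p.2.length := by
        rw [List.length_drop]
        omega
      rw [← h3, List.take_of_length_le (le_of_eq hl), hl]
    rw [PySem.List.slice_from_neg_natCast s.toList p.2.length (by simpa [List.length_pos_iff] using hcur),
      hdrop]
    simp [PySem.Chars.len]

-- ===== VERDICT (by name: the statement is the Claim_ definition above) =====
theorem longword_spec : Claim_equal_longword := by
  intro input_string _
  exact longword_eq_alt input_string
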